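-- pv_equiv track=rewrite | github.com/TugdualSarazin/GhCityGraph | CityGraph/graph_tool.py | path_nodes_to_edges
-- ===== SOURCE A (Python) =====
-- def path_nodes_to_edges(path_nodes):
--     prev_node = None
--     edges = []
--     for n in path_nodes:
--         if prev_node is not None:
--             edges.append((prev_node, n))
--         prev_node = n
--
--     return edges
-- ===== SOURCE B (Python) =====
-- def path_nodes_to_edges(path_nodes):
--     nodes = list(path_nodes)
--     return list(zip(nodes, nodes[1:]))
-- ===== Notes on version B (the rewrite author's own statement) =====
-- stated objective: idiomatic
-- what changed: Replaces the prev-node sentinel loop with accumulator by a single zip of the list with its offset-by-one slice.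
import Mathlib
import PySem

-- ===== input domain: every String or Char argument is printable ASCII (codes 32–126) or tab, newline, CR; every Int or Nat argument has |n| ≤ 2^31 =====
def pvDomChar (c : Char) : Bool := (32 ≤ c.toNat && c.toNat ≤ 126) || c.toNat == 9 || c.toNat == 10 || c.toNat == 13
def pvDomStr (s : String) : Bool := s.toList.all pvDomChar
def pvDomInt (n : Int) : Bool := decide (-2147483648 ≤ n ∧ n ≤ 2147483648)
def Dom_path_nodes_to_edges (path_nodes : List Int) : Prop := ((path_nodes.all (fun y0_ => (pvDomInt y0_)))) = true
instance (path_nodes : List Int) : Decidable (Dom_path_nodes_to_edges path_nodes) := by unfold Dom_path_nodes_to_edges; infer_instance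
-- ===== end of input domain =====

-- B replaces A's prev-node sentinel loop by zipping the list with its 1-offset slice (idiomatic).

-- ===== PORT A =====
-- literal port: prev_node = None; edges = []; for n in path_nodes: if prev is not none append (prev, n); prev = n
def path_nodes_to_edges (path_nodes : List Int) : List (Int × Int) :=
  (path_nodes.foldl
    (fun (st : Option Int × List (Int × Int)) n =>
      (some n,
        match st.1 with
        | some p => st.2 ++ [(p, n)]
        | none => st.2))
    (none, [])).2

-- ===== PORT B =====
-- nodes[1:] is PySem.List.slice_from 1 = drop 1 (nonnegative index); zip = List.zip
def path_nodes_to_edges_alt (path_nodes : List Int) : List (Int × Int) :=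
  path_nodes.zip (path_nodes.drop 1)

-- ===== PRECONDITION & SPEC =====
def Spec_path_nodes_to_edges (path_nodes : List Int) (out : List (Int × Int)) : Prop := out = path_nodes_to_edges_alt path_nodes
instance (path_nodes : List Int) (out : List (Int × Int)) : Decidable (Spec_path_nodes_to_edges path_nodes out) := by unfold Spec_path_nodes_to_edges; infer_instance

-- ===== CLAIM (what is proved, stated in full; the proofs are below) =====
def Claim_equal_path_nodes_to_edges : Prop := ∀ (path_nodes : List Int), Dom_path_nodes_to_edges path_nodes → Spec_path_nodes_to_edges path_nodes (path_nodes_to_edges path_nodes)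

-- ===== LEMMAS AND PROOFS =====

-- loop invariant: once prev = some p, the fold appends exactly the consecutive pairs of p::l
theorem pv_fold_some (l : List Int) (p : Int) (acc : List (Int × Int)) :
    (l.foldl
      (fun (st : Option Int × List (Int × Int)) n =>
        (some n,
          match st.1 with
          | some p => st.2 ++ [(p, n)]
          | none => st.2))
      (some p, acc)).2 = acc ++ (p :: l).zip l := by
  induction l generalizing p acc with
  | nil => simp
  | cons x xs ih => simp [List.foldl, ih, List.zip]

-- ===== VERDICT (by name: the statement is the Claim_ definition above) =====
theorem path_nodes_to_edges_spec : Claim_equal_path_nodes_to_edges := by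
  intro path_nodes _
  unfold Spec_path_nodes_to_edges path_nodes_to_edges path_nodes_to_edges_alt
  cases path_nodes with
  | nil => rfl
  | cons x xs => simp [List.foldl, pv_fold_some]
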